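-- pv_equiv track=rewrite | github.com/fury93/leetcode_python3_solutions | 2358-number-of-ways-to-split-array/number-of-ways-to-split-array.py | waysToSplitArray2
-- ===== SOURCE A (Python) =====
-- from typing import List
--
-- def waysToSplitArray2(nums: List[int]) -> int:
--     postfix = sum(nums)
--     res, prefix = 0, 0
--     for n in nums[:-1]:
--         prefix += n
--         postfix -= n
--         if prefix >= postfix:
--             res += 1
--     return res
-- ===== SOURCE B (Python) =====
-- from typing import List
--
-- def _bisect_left(a, x):
--     lo, hi = 0, len(a)
--     while lo < hi:
--         mid = (lo + hi) // 2
--         if a[mid] < x: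
--             lo = mid + 1
--         else:
--             hi = mid
--     return lo
--
-- def waysToSplitArray2(nums: List[int]) -> int:
--     prefixes = []
--     s = 0
--     for v in nums:
--         s += v
--         prefixes.append(s)
--     ps = sorted(prefixes[:-1])
--     thr = -(-s // 2)  # ceil(total / 2); 2*p >= total  <=>  p >= thr
--     return len(ps) - _bisect_left(ps, thr)
-- ===== Notes on version B (the rewrite author's own statement) =====
-- stated objective: alternative
-- what changed: Instead of A's fused loop maintaining two running sums, B builds the prefix-sum table, sorts it, and counts valid splits as len(sorted) - bisect_left(sorted, ceil(total/2)) by hand-written binary search, exploiting that the count of indices with 2*prefix >= total is order-independent.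
import Mathlib
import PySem

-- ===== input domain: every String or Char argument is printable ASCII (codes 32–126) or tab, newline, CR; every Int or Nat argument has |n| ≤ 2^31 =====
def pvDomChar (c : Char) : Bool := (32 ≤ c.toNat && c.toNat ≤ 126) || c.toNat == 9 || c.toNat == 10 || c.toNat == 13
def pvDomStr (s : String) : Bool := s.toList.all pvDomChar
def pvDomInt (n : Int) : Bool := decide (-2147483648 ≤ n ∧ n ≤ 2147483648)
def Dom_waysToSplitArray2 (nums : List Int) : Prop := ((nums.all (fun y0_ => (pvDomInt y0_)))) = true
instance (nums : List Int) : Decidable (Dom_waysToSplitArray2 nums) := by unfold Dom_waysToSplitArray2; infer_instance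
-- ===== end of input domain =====

-- B replaces A's fused running-sum loop with sort + binary search over the prefix-sum table:
-- counting indices with 2*prefix >= total is order-independent, so B sorts the prefix sums and
-- locates the threshold ceil(total/2) by bisection (alternative algorithm, O(n log n) vs O(n)).


-- ===== PORT A =====
-- nums[:-1] is List.dropLast (exact for this slice); the loop is a foldl over (res, prefix, postfix).
def waysToSplitArray2 (nums : List Int) : Int :=
  let total := nums.sum      -- Python variable `postfix` (Lean keyword), initial value
  (nums.dropLast.foldl
    (fun (st : Int × Int × Int) n =>
      let res := st.1
      let pre := st.2.1 + n     -- prefix += n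
      let post := st.2.2 - n    -- postfix -= n
      (if pre ≥ post then res + 1 else res, pre, post))
    (0, 0, total)).1

-- ===== PORT B =====
-- Source B's hand-written _bisect_left: while lo < hi loop; a[mid] is in range whenever the
-- call keeps lo < hi ≤ len(a), so getD is exact there (the 0 default is never used by B's call).
def bisectLeftLoop (a : List Int) (x : Int) (lo hi : Nat) : Nat :=
  if h : lo < hi then
    if a.getD ((lo + hi) / 2) 0 < x then bisectLeftLoop a x ((lo + hi) / 2 + 1) hi
    else bisectLeftLoop a x lo ((lo + hi) / 2)
  else lo
termination_by hi - lo
decreasing_by all_goals omega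

def waysToSplitArray2_alt (nums : List Int) : Int :=
  -- the prefix-building loop over (s, prefixes)
  let built := nums.foldl (fun (st : Int × List Int) v => (st.1 + v, st.2 ++ [st.1 + v])) (0, [])
  let s := built.1
  let ps := PySem.List.sorted built.2.dropLast (fun p => p) false   -- sorted(prefixes[:-1])
  let thr := -(PySem.Int.floordiv (-s) 2)                           -- -(-s // 2) = ceil(s/2)
  (ps.length : Int) - (bisectLeftLoop ps thr 0 ps.length : Int)

-- ===== PRECONDITION & SPEC =====
def Spec_waysToSplitArray2 (nums : List Int) (out : Int) : Prop := out = waysToSplitArray2_alt nums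
instance (nums : List Int) (out : Int) : Decidable (Spec_waysToSplitArray2 nums out) := by unfold Spec_waysToSplitArray2; infer_instance

-- ===== CLAIM (what is proved, stated in full; the proofs are below) =====
def Claim_equal_waysToSplitArray2 : Prop := ∀ (nums : List Int), Dom_waysToSplitArray2 nums → Spec_waysToSplitArray2 nums (waysToSplitArray2 nums)

-- ===== LEMMAS AND PROOFS =====

-- running prefix sums (reference form both ports' loops are reduced to)
def pyAccumulate (s : Int) : List Int → List Int
  | [] => []
  | x :: t => (s + x) :: pyAccumulate (s + x) t

theorem pyAccumulate_dropLast (xs : List Int) (s : Int) :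
    (pyAccumulate s xs).dropLast = pyAccumulate s xs.dropLast := by
  induction xs generalizing s with
  | nil => simp [pyAccumulate]
  | cons x t ih =>
    rcases t with _ | ⟨y, t'⟩
    · simp [pyAccumulate]
    · have h := ih (s + x)
      rw [List.dropLast_cons₂]
      simp only [pyAccumulate]
      rw [← h]
      simp [pyAccumulate]

-- A's fused loop counts prefix sums q with 2*q ≥ T
theorem foldA_count (l : List Int) (T : Int) : ∀ (res p : Int),
    (l.foldl
      (fun (st : Int × Int × Int) n =>
        (if st.2.1 + n ≥ st.2.2 - n then st.1 + 1 else st.1, st.2.1 + n, st.2.2 - n))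
      (res, p, T - p)).1
    = res + ((pyAccumulate p l).countP (fun q => decide (2 * q ≥ T)) : Int) := by
  induction l with
  | nil => intro res p; simp [pyAccumulate]
  | cons x t ih =>
    intro res p
    simp only [List.foldl_cons, pyAccumulate, List.countP_cons]
    have hst : T - p - x = T - (p + x) := by ring
    have hcond : (p + x ≥ T - p - x) ↔ (decide (2 * (p + x) ≥ T) = true) := by
      simp; omega
    by_cases h : p + x ≥ T - p - x
    · rw [if_pos h, hst, ih (res + 1) (p + x)]
      have : decide (2 * (p + x) ≥ T) = true := hcond.mp h
      simp [this]; ring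
    · rw [if_neg h, hst, ih res (p + x)]
      have : ¬ (decide (2 * (p + x) ≥ T) = true) := fun hc => h (hcond.mpr hc)
      simp at this
      simp [this]

-- B's prefix-building loop produces the running sum and the accumulate table
theorem foldB_build (xs : List Int) : ∀ (s : Int) (acc : List Int),
    xs.foldl (fun (st : Int × List Int) v => (st.1 + v, st.2 ++ [st.1 + v])) (s, acc)
      = (s + xs.sum, acc ++ pyAccumulate s xs) := by
  induction xs with
  | nil => intro s acc; simp [pyAccumulate]
  | cons x t ih =>
    intro s acc
    simp only [List.foldl_cons, pyAccumulate, List.sum_cons]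
    rw [ih (s + x)]
    simp [add_assoc]

-- In a sorted list the elements < x are exactly the first countP-many
theorem sorted_getD_lt_iff (a : List Int) (x : Int) (hs : a.Pairwise (· ≤ ·)) :
    ∀ i, i < a.length → (a.getD i 0 < x ↔ i < a.countP (fun p => decide (p < x))) := by
  induction a with
  | nil => intro i h; simp at h
  | cons y t ih =>
    rcases List.pairwise_cons.mp hs with ⟨hy, ht⟩
    intro i hi
    have hcount : (y :: t).countP (fun p => decide (p < x))
        = t.countP (fun p => decide (p < x)) + (if y < x then 1 else 0) := by
      simp [List.countP_cons]
    by_cases hyx : y < x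
    · cases i with
      | zero =>
        simp only [List.getD_cons_zero, hcount, if_pos hyx]
        constructor
        · intro _; omega
        · intro _; exact hyx
      | succ j =>
        have hj : j < t.length := by simpa using hi
        rw [List.getD_cons_succ, hcount, if_pos hyx]
        rw [ih ht j hj]
        omega
    · -- y ≥ x, so every element of y :: t is ≥ x and the count is 0
      have hzero : t.countP (fun p => decide (p < x)) = 0 := by
        rw [List.countP_eq_zero]
        intro z hz
        have := hy z hz
        simp only [decide_eq_true_eq]
        omega
      cases i with
      | zero =>
        simp only [List.getD_cons_zero, hcount, if_neg hyx, hzero]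
        constructor
        · intro h; exact absurd h hyx
        · intro h; omega
      | succ j =>
        have hj : j < t.length := by simpa using hi
        rw [List.getD_cons_succ, hcount, if_neg hyx, hzero]
        have hmem : t.getD j 0 = t[j] := List.getD_eq_getElem t 0 hj
        have : y ≤ t[j] := hy _ (List.getElem_mem hj)
        constructor
        · intro h; rw [hmem] at h; omega
        · intro h; omega

-- the binary search on a sorted list returns countP (· < x)
theorem bisectLeftLoop_eq (a : List Int) (x : Int) (hs : a.Pairwise (· ≤ ·)) :
    ∀ (n lo hi : Nat), hi - lo ≤ n → hi ≤ a.length →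
      lo ≤ a.countP (fun p => decide (p < x)) → a.countP (fun p => decide (p < x)) ≤ hi →
      bisectLeftLoop a x lo hi = a.countP (fun p => decide (p < x)) := by
  intro n
  induction n with
  | zero =>
    intro lo hi hfuel hlen hlo hhi
    rw [bisectLeftLoop]
    rw [dif_neg (by omega)]
    omega
  | succ n ih =>
    intro lo hi hfuel hlen hlo hhi
    rw [bisectLeftLoop]
    by_cases h : lo < hi
    · rw [dif_pos h]
      have hmid₁ : lo ≤ (lo + hi) / 2 := by omega
      have hmid₂ : (lo + hi) / 2 < hi := by omega
      have hmlen : (lo + hi) / 2 < a.length := lt_of_lt_of_le hmid₂ hlen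
      by_cases hm : a.getD ((lo + hi) / 2) 0 < x
      · rw [if_pos hm]
        have := (sorted_getD_lt_iff a x hs _ hmlen).mp hm
        exact ih _ hi (by omega) hlen (by omega) hhi
      · rw [if_neg hm]
        have : ¬ ((lo + hi) / 2 < a.countP (fun p => decide (p < x))) :=
          fun hc => hm ((sorted_getD_lt_iff a x hs _ hmlen).mpr hc)
        exact ih lo _ (by omega) (le_of_lt hmlen) hlo (by omega)
    · rw [dif_neg h]
      omega

-- ===== VERDICT (by name: the statement is the Claim_ definition above) =====
theorem waysToSplitArray2_spec : Claim_equal_waysToSplitArray2 := by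
  intro nums _
  unfold Spec_waysToSplitArray2 waysToSplitArray2 waysToSplitArray2_alt
  have hbuild := foldB_build nums 0 []
  simp only [hbuild, List.nil_append, zero_add]
  set T := nums.sum with hT
  set pref := (pyAccumulate 0 nums).dropLast with hpref
  set ps := PySem.List.sorted pref (fun p => p) false with hps
  set thr := -(PySem.Int.floordiv (-T) 2) with hthr
  -- threshold bounds: 2*thr - 2 < T ≤ 2*thr
  have hbounds : (thr - 1) * 2 < T ∧ T ≤ thr * 2 :=
    (PySem.Int.neg_floordiv_neg_eq_iff_of_pos (a := T) (b := 2) (q := thr)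
      (by norm_num)).mp rfl
  -- the sorted list: permutation of pref, pairwise ≤
  have hperm : ps.Perm pref := PySem.List.sorted_perm pref (fun p => p) false
  have hpair : ps.Pairwise (· ≤ ·) := by
    have := PySem.List.sorted_pairwise (xs := pref) (key := fun p => p)
    simpa using this
  -- binary search value
  have hbl : bisectLeftLoop ps thr 0 ps.length = ps.countP (fun p => decide (p < thr)) :=
    bisectLeftLoop_eq ps thr hpair ps.length 0 ps.length (by omega) le_rfl
      (Nat.zero_le _) List.countP_le_length
  -- A's count over pref
  have hA := foldA_count nums.dropLast T 0 0
  rw [show T - (0:Int) = T by ring] at hA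
  -- counts: length = countP(<thr) + countP(¬<thr) and countP(2*q≥T) = countP(¬<thr)
  have hcongr : pref.countP (fun q => decide (2 * q ≥ T))
      = pref.countP (fun p => decide (thr ≤ p)) := by
    apply List.countP_congr
    intro q _
    simp only [decide_eq_true_eq, ge_iff_le]
    omega
  have hsplit : ps.length = ps.countP (fun p => decide (p < thr))
      + ps.countP (fun p => decide (thr ≤ p)) := by
    have := List.length_eq_countP_add_countP (l := ps) (fun p => decide (p < thr))
    simp only [decide_eq_true_eq, not_lt] at this
    omega
  have hpermc : ps.countP (fun p => decide (thr ≤ p))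
      = pref.countP (fun p => decide (thr ≤ p)) := hperm.countP_eq _
  rw [hA, ← pyAccumulate_dropLast, ← hpref, hcongr, hbl]
  rw [← hpermc]
  push_cast [hsplit]
  ring
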